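-- pv_equiv track=rewrite | github.com/ch-neural/Civatas-TW | Paper/tests/test_blind_validation.py | _fixture_rows
-- ===== SOURCE A (Python) =====
-- def _fixture_rows(n_per_cell: int = 10) -> list[dict]:
--     """5 vendor × 3 expected = 15 cells; n_per_cell rows each."""
--     vendors = ["openai", "gemini", "grok", "deepseek", "kimi"]
--     categories = ["hard_refusal_expected", "soft_refusal_expected", "on_task_expected"]
--     labels_cycle = ["hard_refusal", "soft_refusal", "on_task"]
--     rows: list[dict] = []
--     counter = 0
--     for v in vendors:
--         for cat in categories:
--             for i in range(n_per_cell):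
--                 counter += 1
--                 rows.append({
--                     "prompt_id": f"P{counter:04d}",
--                     "vendor": v,
--                     "prompt_text": f"Q {counter}",
--                     "response_text": f"R {counter}",
--                     "label": labels_cycle[counter % 3],
--                     "expected": cat,
--                     "topic": "factual",
--                     "status": "ok",
--                 })
--     return rows
-- ===== SOURCE B (Python) =====
-- def _fixture_rows(n_per_cell: int = 10) -> list[dict]:
--     """5 vendor x 3 expected = 15 cells; n_per_cell rows each."""
--     vendors = ["openai", "gemini", "grok", "deepseek", "kimi"]
--     categories = ["hard_refusal_expected", "soft_refusal_expected", "on_task_expected"]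
--     labels_cycle = ["hard_refusal", "soft_refusal", "on_task"]
--     return [
--         {
--             "prompt_id": f"P{k + 1:04d}",
--             "vendor": vendors[k // (3 * n_per_cell)],
--             "prompt_text": f"Q {k + 1}",
--             "response_text": f"R {k + 1}",
--             "label": labels_cycle[(k + 1) % 3],
--             "expected": categories[(k // n_per_cell) % 3],
--             "topic": "factual",
--             "status": "ok",
--         }
--         for k in range(len(vendors) * 3 * n_per_cell)
--     ]
-- ===== Notes on version B (the rewrite author's own statement) =====
-- stated objective: simpler
-- what changed: Replaces the three nested loops with a running counter by a single flat list comprehension over k in range(15*n_per_cell) that derives the vendor (k // (3*n)), category ((k // n) % 3) and counter (k+1) arithmetically from the flat index.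
import Mathlib
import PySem

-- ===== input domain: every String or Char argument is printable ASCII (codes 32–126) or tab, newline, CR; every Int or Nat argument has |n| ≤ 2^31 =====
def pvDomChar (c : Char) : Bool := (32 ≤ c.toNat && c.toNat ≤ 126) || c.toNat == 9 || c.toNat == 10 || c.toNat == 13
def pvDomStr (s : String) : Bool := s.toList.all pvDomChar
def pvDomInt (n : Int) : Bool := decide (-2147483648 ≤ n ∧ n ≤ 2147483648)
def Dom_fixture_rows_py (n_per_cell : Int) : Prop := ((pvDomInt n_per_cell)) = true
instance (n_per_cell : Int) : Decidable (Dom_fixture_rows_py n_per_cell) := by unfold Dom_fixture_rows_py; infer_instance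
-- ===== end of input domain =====

-- B replaces the three nested loops and running counter by one flat comprehension over
-- k in range(15*n), deriving vendor/category/counter arithmetically (objective: simpler decomposition).

-- f"{i:04d}" for i ≥ 0 (hand port, exact for nonnegative i; counters here are always ≥ 1)
def pvFmt04 (i : Int) : String :=
  let cs := PySem.Int.toChars i
  String.ofList (List.replicate (4 - cs.length) '0' ++ cs)

-- ===== PORT A =====
def pvRowA (counter : Int) (v cat : String) : List (String × String) :=
  let labels_cycle := ["hard_refusal", "soft_refusal", "on_task"]
  [("prompt_id", "P" ++ pvFmt04 counter),
   ("vendor", v),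
   ("prompt_text", "Q " ++ PySem.Int.toStr counter),
   ("response_text", "R " ++ PySem.Int.toStr counter),
   ("label", PySem.List.pyGetD labels_cycle (PySem.Int.mod counter 3) ""),
   ("expected", cat),
   ("topic", "factual"),
   ("status", "ok")]

def pvStepA (v cat : String) (st : List (List (String × String)) × Int) (_i : Int) :
    List (List (String × String)) × Int :=
  let counter := st.2 + 1
  (st.1 ++ [pvRowA counter v cat], counter)

def fixture_rows_py (n_per_cell : Int) : List (List (String × String)) :=
  let vendors := ["openai", "gemini", "grok", "deepseek", "kimi"]
  let categories := ["hard_refusal_expected", "soft_refusal_expected", "on_task_expected"]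
  (vendors.foldl (fun st v =>
    categories.foldl (fun st cat =>
      (PySem.List.pyRange 0 n_per_cell 1).foldl (pvStepA v cat) st) st) ([], 0)).1

-- ===== PORT B =====
def pvRowB (n_per_cell k : Int) : List (String × String) :=
  let vendors := ["openai", "gemini", "grok", "deepseek", "kimi"]
  let categories := ["hard_refusal_expected", "soft_refusal_expected", "on_task_expected"]
  let labels_cycle := ["hard_refusal", "soft_refusal", "on_task"]
  let counter := k + 1
  [("prompt_id", "P" ++ pvFmt04 counter),
   ("vendor", PySem.List.pyGetD vendors (PySem.Int.floordiv k (3 * n_per_cell)) ""),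
   ("prompt_text", "Q " ++ PySem.Int.toStr counter),
   ("response_text", "R " ++ PySem.Int.toStr counter),
   ("label", PySem.List.pyGetD labels_cycle (PySem.Int.mod counter 3) ""),
   ("expected", PySem.List.pyGetD categories (PySem.Int.mod (PySem.Int.floordiv k n_per_cell) 3) ""),
   ("topic", "factual"),
   ("status", "ok")]

def fixture_rows_py_alt (n_per_cell : Int) : List (List (String × String)) :=
  (PySem.List.pyRange 0 (5 * 3 * n_per_cell) 1).map (pvRowB n_per_cell)

-- ===== PRECONDITION & SPEC =====
def Spec_fixture_rows_py (n_per_cell : Int) (out : List (List (String × String))) : Prop := out = fixture_rows_py_alt n_per_cell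
instance (n_per_cell : Int) (out : List (List (String × String))) : Decidable (Spec_fixture_rows_py n_per_cell out) := by unfold Spec_fixture_rows_py; infer_instance

-- ===== CLAIM (what is proved, stated in full; the proofs are below) =====
def Claim_equal_fixture_rows_py : Prop := ∀ (n_per_cell : Int), Dom_fixture_rows_py n_per_cell → Spec_fixture_rows_py n_per_cell (fixture_rows_py n_per_cell)

-- ===== LEMMAS AND PROOFS =====

lemma foldA (v cat : String) : ∀ (L : List Int) (r0 : List (List (String × String))) (c0 : Int),
    L.foldl (pvStepA v cat) (r0, c0)
      = (r0 ++ (List.range L.length).map (fun (j : Nat) => pvRowA (c0 + (j : Int) + 1) v cat),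
         c0 + L.length) := by
  intro L
  induction L with
  | nil => intro r0 c0; simp
  | cons h t ih =>
    intro r0 c0
    simp only [List.foldl_cons, pvStepA, ih, List.length_cons, Prod.mk.injEq]
    constructor
    · rw [List.range_succ_eq_map, List.map_cons, List.map_map, List.append_assoc,
          List.singleton_append]
      congr 1
      congr 1
      · norm_num
      · congr 1
        funext j
        simp only [Function.comp_apply]
        congr 1
        push_cast
        ring
    · push_cast
      ring

lemma cellA (v cat : String) (n : Int) (r0 : List (List (String × String))) (c0 : Int) :
    (PySem.List.pyRange 0 n 1).foldl (pvStepA v cat) (r0, c0)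
      = (r0 ++ (List.range n.toNat).map (fun (j : Nat) => pvRowA (c0 + (j : Int) + 1) v cat),
         c0 + n.toNat) := by
  rw [foldA]
  simp [PySem.List.length_pyRange_one]

lemma natdiv_block (c m j q r : Nat) (hc : c = 3 * q + r) (hr : r < 3) (hj : j < m) :
    (c * m + j) / (3 * m) = q ∧ (c * m + j) / m = c := by
  have hm : 0 < m := by omega
  constructor
  · have h1 : c * m + j = r * m + j + 3 * m * q := by subst hc; ring
    rw [h1, Nat.add_mul_div_left _ _ (by omega : 0 < 3 * m),
        Nat.div_eq_of_lt (by nlinarith)]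
    omega
  · have h1 : c * m + j = j + m * c := by ring
    rw [h1, Nat.add_mul_div_left _ _ hm, Nat.div_eq_of_lt hj]
    omega

lemma rowB_eq (c m j : Nat) (hj : j < m) :
    pvRowB (m : Int) ((c * m + j : Nat) : Int)
      = pvRowA (((c * m + j : Nat) : Int) + 1)
          (["openai", "gemini", "grok", "deepseek", "kimi"].getD (c / 3) "")
          (["hard_refusal_expected", "soft_refusal_expected", "on_task_expected"].getD (c % 3) "") := by
  obtain ⟨hd1, hd2⟩ := natdiv_block c m j (c / 3) (c % 3) (by omega) (by omega) hj
  have e1 : PySem.Int.floordiv ((c * m + j : Nat) : Int) (3 * (m : Int)) = ((c / 3 : Nat) : Int) := by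
    have h3 : (3 * (m : Int)) = ((3 * m : Nat) : Int) := by push_cast; ring
    rw [h3, PySem.Int.floordiv_natCast, hd1]
  have e2 : PySem.Int.mod (PySem.Int.floordiv ((c * m + j : Nat) : Int) (m : Int)) 3
      = ((c % 3 : Nat) : Int) := by
    rw [PySem.Int.floordiv_natCast, hd2]
    have h3 : (3 : Int) = ((3 : Nat) : Int) := by norm_num
    rw [h3, PySem.Int.mod_natCast]
  simp only [pvRowB, pvRowA, e1, e2, PySem.List.pyGetD_natCast]

-- map over range (s*m) splits into s blocks of m
lemma blockSplit {α : Type} (f : Nat → α) (m : Nat) : ∀ (s : Nat),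
    (List.range (s * m)).map f
      = (List.range s).flatMap (fun c => (List.range m).map (fun j => f (c * m + j))) := by
  intro s
  induction s with
  | zero => simp
  | succ s ih =>
    rw [Nat.succ_mul, List.range_add, List.map_append, ih, List.range_succ,
        List.flatMap_append, List.flatMap_singleton, List.map_map]
    rfl

-- one cell of A equals one block of B
lemma cellBA (m c : Nat) (off : Int) (hoff : off = ((c * m : Nat) : Int))
    (v cat : String)
    (hv : v = ["openai", "gemini", "grok", "deepseek", "kimi"].getD (c / 3) "")
    (hcat : cat = ["hard_refusal_expected", "soft_refusal_expected", "on_task_expected"].getD (c % 3) "") :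
    (List.range m).map (fun (j : Nat) => pvRowA (off + (j : Int) + 1) v cat)
      = (List.range m).map (fun (j : Nat) => pvRowB (m : Int) ((c * m + j : Nat) : Int)) := by
  apply List.map_congr_left
  intro j hj
  rw [rowB_eq c m j (List.mem_range.mp hj), hv, hcat]
  congr 1
  push_cast [hoff]
  ring

lemma main_eq (m : Nat) : fixture_rows_py (m : Int) = fixture_rows_py_alt (m : Int) := by
  have hB : fixture_rows_py_alt (m : Int)
      = (List.range (15 * m)).map (fun (j : Nat) => pvRowB (m : Int) (j : Int)) := by
    unfold fixture_rows_py_alt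
    have h15 : (5 * 3 * (m : Int)) = ((15 * m : Nat) : Int) := by push_cast; ring
    rw [h15, PySem.List.pyRange_zero_nat, List.map_map]
    rfl
  rw [hB, blockSplit (fun (j : Nat) => pvRowB (m : Int) (j : Int)) m 15]
  simp only [fixture_rows_py, List.foldl_cons, List.foldl_nil, cellA, Int.toNat_natCast,
    List.nil_append]
  simp only [List.range_succ, List.flatMap_append, List.flatMap_cons, List.flatMap_nil,
    List.append_nil, List.nil_append, List.range_zero, List.append_assoc]
  repeat' refine congrArg₂ (· ++ ·) ?_ ?_
  all_goals (apply cellBA <;> first | (push_cast; ring1) | simp)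

theorem fixture_rows_py_spec : Claim_equal_fixture_rows_py := by
  intro n _
  unfold Spec_fixture_rows_py
  by_cases hn : 0 ≤ n
  · have h : n = ((n.toNat : Nat) : Int) := by omega
    rw [h, main_eq]
  · unfold fixture_rows_py fixture_rows_py_alt
    rw [PySem.List.pyRange_one_eq_nil (by omega : n ≤ 0),
        PySem.List.pyRange_one_eq_nil (by omega : 5 * 3 * n ≤ 0)]
    simp [List.foldl]
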